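-- pv_equiv track=rewrite | github.com/somsomi2/Python_Basic | python.py | recursive_append
-- ===== SOURCE A (Python) =====
-- def recursive_append(number, result=None):
--
--     if result is None: # 리스트가 없으면 리스트를 만들기 위해 작성한 조건문
--         result = []
--
--     if number == 0: # 재귀함수 종료 조건 선언
--         return result
--
--     number -= 1 # 1을 감산하고
--     result.append(number) # result 리스트에 값 넣기
--
--     return recursive_append(number, result)
-- ===== SOURCE B (Python) =====
-- def recursive_append(number, result=None):
--     if result is None:
--         result = []
--     result.extend(range(number - 1, -1, -1))
--     return result
-- ===== Notes on version B (the rewrite author's own statement) =====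
-- stated objective: idiomatic
-- what changed: Replaces the tail recursion (one call frame per element) with a single extend over a countdown range; no recursion at all.
import Mathlib
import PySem

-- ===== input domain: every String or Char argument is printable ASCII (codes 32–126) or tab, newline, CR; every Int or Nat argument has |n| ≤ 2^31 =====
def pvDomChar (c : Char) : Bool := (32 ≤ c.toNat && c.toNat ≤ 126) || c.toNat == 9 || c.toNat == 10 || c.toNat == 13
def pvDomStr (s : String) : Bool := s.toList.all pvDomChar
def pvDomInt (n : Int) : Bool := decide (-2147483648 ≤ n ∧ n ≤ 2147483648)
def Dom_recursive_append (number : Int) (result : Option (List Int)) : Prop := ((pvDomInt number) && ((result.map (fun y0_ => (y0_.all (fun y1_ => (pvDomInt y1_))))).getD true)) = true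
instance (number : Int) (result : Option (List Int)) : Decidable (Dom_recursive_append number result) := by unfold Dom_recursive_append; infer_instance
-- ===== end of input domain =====

-- B replaces A's tail recursion by one extend over a countdown range (idiomatic, no recursion).
-- A mutates a caller-supplied result list in place (and so does B); the equivalence proved here is about the return value.

-- ===== PORT A =====
-- A's recursion decrements number until it hits 0, appending each decremented value;
-- ported as structural recursion on number.toNat (for number < 0 Python A raises RecursionError, excluded by Pre_).
def recursive_append_go (n : Nat) (acc : List Int) : List Int :=
  match n with
  | 0 => acc                                   -- if number == 0: return result
  | Nat.succ m => recursive_append_go m (acc ++ [(m : Int)])  -- number -= 1; result.append(number); recurse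

def recursive_append (number : Int) (result : Option (List Int)) : List Int :=
  recursive_append_go number.toNat (result.getD [])   -- if result is None: result = []

-- ===== PORT B =====
def recursive_append_alt (number : Int) (result : Option (List Int)) : List Int :=
  result.getD [] ++ PySem.List.pyRange (number - 1) (-1) (-1)   -- result.extend(range(number-1, -1, -1))

-- ===== PRECONDITION & SPEC =====
-- For number < 0 the Python A never reaches 0 and raises RecursionError; those inputs are excluded.
def Pre_recursive_append (number : Int) (result : Option (List Int)) : Prop := 0 ≤ number
instance (number : Int) (result : Option (List Int)) : Decidable (Pre_recursive_append number result) := by unfold Pre_recursive_append; infer_instance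

def pvWitness_recursive_append : Int × Option (List Int) := (4, some [7, 8])

def Spec_recursive_append (number : Int) (result : Option (List Int)) (out : List Int) : Prop := out = recursive_append_alt number result
instance (number : Int) (result : Option (List Int)) (out : List Int) : Decidable (Spec_recursive_append number result out) := by unfold Spec_recursive_append; infer_instance

-- ===== CLAIM (what is proved, stated in full; the proofs are below) =====
def Claim_equal_recursive_append : Prop := ∀ (number : Int) (result : Option (List Int)), Dom_recursive_append number result → Pre_recursive_append number result → Spec_recursive_append number result (recursive_append number result)

-- ===== LEMMAS AND PROOFS =====
theorem recursive_append_go_eq (n : Nat) (acc : List Int) :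
    recursive_append_go n acc = acc ++ (List.range n).map (fun k : Nat => (n : Int) - 1 - (k : Int)) := by
  induction n generalizing acc with
  | zero => simp [recursive_append_go]
  | succ m ih =>
      rw [recursive_append_go, ih, List.range_succ_eq_map]
      simp only [List.map_cons, List.map_map, List.append_assoc, List.singleton_append]
      refine congrArg _ (congrArg₂ _ (by push_cast; ring) ?_)
      exact List.map_congr_left fun k _ => by simp only [Function.comp_apply]; push_cast; ring

-- ===== VERDICT (by name: the statement is the Claim_ definition above) =====
theorem recursive_append_spec : Claim_equal_recursive_append := by
  intro number result _ hpre
  unfold Pre_recursive_append at hpre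
  unfold Spec_recursive_append recursive_append recursive_append_alt
  rw [recursive_append_go_eq, PySem.List.pyRange_neg_one]
  have h1 : number - 1 - (-1) = number := by ring
  rw [h1]
  congr 1
  exact List.map_congr_left fun k _ => by omega
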